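-- pv_equiv track=rewrite | github.com/jiajunma/kosulcodes | perm.py | is_bruhat_leq
-- ===== SOURCE A (Python) =====
-- def is_bruhat_leq(u, v):
--     """
--     Decide whether permutation u is <= v in the (strong) Bruhat order.
--
--     This uses the rank-matrix criterion:
--     For all i,j in [n], define x[i,j] = |{a <= i : x(a) >= j}|.
--     Then u <= v iff u[i,j] <= v[i,j] for all i,j.
--
--     Args:
--         u: Permutation as a tuple or list, length n.
--         v: Permutation as a tuple or list, length n.
--
--     Returns:
--         True if u <= v in the (strong) Bruhat order, else False.
--
--     Examples:
--         >>> is_bruhat_leq((1,2,3), (3,2,1))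
--         True
--         >>> is_bruhat_leq((2,1,3), (3,1,2))
--         True
--         >>> is_bruhat_leq((3,1,2), (2,3,1))
--         False
--     """
--     key = (tuple(u), tuple(v))
--     cache = getattr(is_bruhat_leq, "_cache", None)
--     if cache is None:
--         cache = {}
--         setattr(is_bruhat_leq, "_cache", cache)
--     if key in cache:
--         return cache[key]
--     n = len(u)
--     for i in range(1, n + 1):
--         for j in range(1, n + 1):
--             u_count = sum(1 for x in u[:i] if x >= j)
--             v_count = sum(1 for x in v[:i] if x >= j)
--             if u_count > v_count:
--                 cache[key] = False
--                 return False
--     cache[key] = True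
--     return True
-- ===== SOURCE B (Python) =====
-- def is_bruhat_leq(u, v):
--     """Rank-matrix Bruhat comparison with incremental prefix counts:
--     one pass over the rows, keeping d[k] = u[i,k+1] - v[i,k+1] and
--     updating it with the single new element of each row."""
--     n = len(u)
--     d = [0] * n
--     for i in range(n):
--         x, y = u[i], v[i]
--         d = [dj + (k + 1 <= x) - (k + 1 <= y) for k, dj in enumerate(d)]
--         if any(dj > 0 for dj in d):
--             return False
--     return True
-- ===== Notes on version B (the rewrite author's own statement) =====
-- stated objective: faster
-- what changed: Instead of re-summing both prefix counts for every (i,j) cell (O(n^3)), B keeps one running tally d of the n per-column count differences, updates it with the single new element of each row, and checks d once per row; Pre_ excludes pairs with v shorter than u (not same-length permutations), where A's slicing silently truncates v while B's v[i] can raise IndexError.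
-- outside the precondition, e.g. on is_bruhat_leq([1], []): A returns False, B raises IndexError
import Mathlib
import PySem

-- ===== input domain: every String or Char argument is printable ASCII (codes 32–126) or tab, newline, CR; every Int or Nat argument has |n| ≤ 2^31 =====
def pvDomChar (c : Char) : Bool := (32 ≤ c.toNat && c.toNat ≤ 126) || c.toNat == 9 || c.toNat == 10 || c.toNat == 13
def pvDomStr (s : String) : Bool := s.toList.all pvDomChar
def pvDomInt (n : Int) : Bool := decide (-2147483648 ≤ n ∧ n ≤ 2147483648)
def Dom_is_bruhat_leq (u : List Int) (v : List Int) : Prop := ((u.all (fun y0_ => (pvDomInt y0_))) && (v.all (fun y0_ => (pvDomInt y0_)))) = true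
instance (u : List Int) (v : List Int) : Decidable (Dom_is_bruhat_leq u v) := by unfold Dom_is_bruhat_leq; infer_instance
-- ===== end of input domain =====

-- B replaces A's per-cell re-summation of rank-matrix entries (O(n^3)) by a single running
-- tally of per-column count differences, updated once per row (O(n^2)); objective: faster.
-- A also memoizes results in a function attribute; the equivalence here is about the return value.


-- ===== PORT A =====
-- `sum(1 for x in w[:i] if x >= j)`
def pvCountGe (w : List Int) (j : Int) : Int :=
  w.foldl (fun acc x => if x ≥ j then acc + 1 else acc) 0

-- the memoization cache of A does not affect the returned value and is not ported
def is_bruhat_leq (u : List Int) (v : List Int) : Bool :=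
  let n := u.length
  (PySem.List.pyRange 1 ((n : Int) + 1) 1).all (fun i =>
    (PySem.List.pyRange 1 ((n : Int) + 1) 1).all (fun j =>
      let u_count := pvCountGe (PySem.List.slice u none (some i)) j
      let v_count := pvCountGe (PySem.List.slice v none (some i)) j
      !(u_count > v_count)))

-- ===== PORT B =====
-- the list-comprehension update of d for one row (u element x, v element y)
def pvStep (x : Int) (y : Int) (d : List Int) : List Int :=
  d.mapIdx (fun k dj =>
    dj + (if (k : Int) + 1 ≤ x then 1 else 0) - (if (k : Int) + 1 ≤ y then 1 else 0))

-- the `for i in range(n)` loop, consuming u row by row; `none` = IndexError on `v[i]`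
-- (unreachable under Pre_is_bruhat_leq)
def pvLoop (v : List Int) (i : Nat) (d : List Int) : List Int → Option Bool
  | [] => some true
  | x :: rest =>
      match v[i]? with
      | none => none
      | some y =>
          let d' := pvStep x y d
          if d'.any (fun dj => decide (0 < dj)) then some false
          else pvLoop v (i + 1) d' rest

def is_bruhat_leq_alt (u : List Int) (v : List Int) : Bool :=
  (pvLoop v 0 (List.replicate u.length 0) u).getD false

-- ===== PRECONDITION & SPEC =====
-- Pre_ excludes pairs with v shorter than u (not same-length permutations): there A's slicing
-- silently truncates v and A still returns, while B's natural indexing v[i] can raise IndexError.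
def Pre_is_bruhat_leq (u : List Int) (v : List Int) : Prop := u.length ≤ v.length
instance (u : List Int) (v : List Int) : Decidable (Pre_is_bruhat_leq u v) := by unfold Pre_is_bruhat_leq; infer_instance
def pvWitness_is_bruhat_leq : List Int × List Int := ([2, 1, 3], [3, 1, 2])

def Spec_is_bruhat_leq (u : List Int) (v : List Int) (out : Bool) : Prop := out = is_bruhat_leq_alt u v
instance (u : List Int) (v : List Int) (out : Bool) : Decidable (Spec_is_bruhat_leq u v out) := by unfold Spec_is_bruhat_leq; infer_instance

-- ===== CLAIM (what is proved, stated in full; the proofs are below) =====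
def Claim_equal_is_bruhat_leq : Prop := ∀ (u : List Int) (v : List Int), Dom_is_bruhat_leq u v → Pre_is_bruhat_leq u v → Spec_is_bruhat_leq u v (is_bruhat_leq u v)

-- ===== LEMMAS AND PROOFS =====

-- number of entries ≥ j among the first i entries of w, as an Int
def pvC (w : List Int) (i : Nat) (j : Int) : Int := ((w.take i).countP (fun x => j ≤ x) : Int)

theorem pvCountGe_eq_countP (w : List Int) (j : Int) :
    pvCountGe w j = (w.countP (fun x => j ≤ x) : Int) := by
  unfold pvCountGe
  suffices h : ∀ (acc : Int), w.foldl (fun acc x => if x ≥ j then acc + 1 else acc) acc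
      = acc + (w.countP (fun x => j ≤ x) : Int) by
    simpa using h 0
  induction w with
  | nil => intro acc; simp
  | cons x xs ih =>
      intro acc
      by_cases hx : j ≤ x
      · simp [hx, ih, ge_iff_le]; ring
      · simp [hx, ih, ge_iff_le]

theorem pvC_succ (w : List Int) (i : Nat) (hi : i < w.length) (j : Int) :
    pvC w (i + 1) j = pvC w i j + (if j ≤ w[i] then 1 else 0) := by
  unfold pvC
  rw [List.take_add_one, List.getElem?_eq_getElem hi]
  simp only [Option.toList_some, List.countP_append, List.countP_cons, List.countP_nil]
  by_cases hj : j ≤ w[i] <;> simp [hj]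

theorem pvStep_length (x y : Int) (d : List Int) :
    (pvStep x y d).length = d.length := by simp [pvStep]

theorem pvStep_getElem (x y : Int) (d : List Int) (k : Nat) (hk : k < d.length) :
    (pvStep x y d)[k]'(by simpa [pvStep_length] using hk)
      = d[k] + (if (k : Int) + 1 ≤ x then 1 else 0) - (if (k : Int) + 1 ≤ y then 1 else 0) := by
  simp [pvStep]

-- main invariant on the B-side loop (under the length precondition)
theorem pvLoop_iff (u v : List Int) (hv : u.length ≤ v.length) :
    ∀ (rest : List Int) (i : Nat) (d : List Int) (hlen : d.length = u.length)
      (hinv : ∀ k (hk : k < u.length), d[k]'(by omega) = pvC u i ((k : Int) + 1) - pvC v i ((k : Int) + 1))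
      (hdrop : rest = u.drop i),
      ∃ b, pvLoop v i d rest = some b ∧
        (b = true ↔
          ∀ m, i < m → m ≤ u.length → ∀ k, k < u.length →
            pvC u m ((k : Int) + 1) ≤ pvC v m ((k : Int) + 1)) := by
  intro rest
  induction rest with
  | nil =>
      intro i d hlen hinv hdrop
      have hi : u.length ≤ i := by
        have := congrArg List.length hdrop
        simp at this; omega
      refine ⟨true, rfl, ?_⟩
      constructor
      · intro _ m hm1 hm2 k hk; omega
      · intro _; rfl
  | cons x rest ih =>
      intro i d hlen hinv hdrop
      have hi : i < u.length := by
        by_contra h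
        rw [List.drop_of_length_le (by omega)] at hdrop
        exact absurd hdrop (by simp)
      have hiv : i < v.length := by omega
      have hx : x = u[i] := by
        rw [List.drop_eq_getElem_cons hi] at hdrop
        exact (List.cons.injEq .. ▸ hdrop).1
      have hrest : rest = u.drop (i + 1) := by
        rw [List.drop_eq_getElem_cons hi] at hdrop
        exact (List.cons.injEq .. ▸ hdrop).2
      have hlen' : (pvStep x v[i] d).length = u.length := by
        rw [pvStep_length]; exact hlen
      have hinv' : ∀ k (hk : k < u.length),
          (pvStep x v[i] d)[k]'(by omega)
            = pvC u (i+1) ((k : Int) + 1) - pvC v (i+1) ((k : Int) + 1) := by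
        intro k hk
        rw [pvStep_getElem x v[i] d k (by omega), hinv k hk,
            pvC_succ u i hi ((k : Int) + 1), pvC_succ v i hiv ((k : Int) + 1), ← hx]
        ring
      have hany : ((pvStep x v[i] d).any (fun dj => decide (0 < dj)) = true) ↔
          ∃ k, k < u.length ∧ pvC v (i+1) ((k : Int) + 1) < pvC u (i+1) ((k : Int) + 1) := by
        rw [List.any_eq_true]
        constructor
        · rintro ⟨dj, hmem, hdj⟩
          obtain ⟨k, hk, hkeq⟩ := List.getElem_of_mem hmem
          refine ⟨k, by omega, ?_⟩
          have h1 := hinv' k (by omega)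
          rw [hkeq] at h1
          simp only [decide_eq_true_eq] at hdj
          omega
        · rintro ⟨k, hk, hlt⟩
          refine ⟨(pvStep x v[i] d)[k]'(by omega), List.getElem_mem _, ?_⟩
          have := hinv' k hk
          exact decide_eq_true (by omega)
      show (∃ b, (match v[i]? with
            | none => none
            | some y =>
                let d' := pvStep x y d
                if d'.any (fun dj => decide (0 < dj)) then some false
                else pvLoop v (i+1) d' rest) = some b ∧ _)
      rw [List.getElem?_eq_getElem hiv]
      simp only
      by_cases hc : (pvStep x v[i] d).any (fun dj => decide (0 < dj)) = true
      · rw [if_pos hc]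
        obtain ⟨k, hk, hlt⟩ := hany.mp hc
        refine ⟨false, rfl, ?_⟩
        refine iff_of_false (by simp) ?_
        intro hall
        exact absurd (hall (i+1) (by omega) (by omega) k hk) (by omega)
      · rw [if_neg hc]
        obtain ⟨b, hb, hiff⟩ := ih (i+1) (pvStep x v[i] d) hlen' hinv' hrest
        refine ⟨b, hb, hiff.trans ?_⟩
        have hok : ∀ k, k < u.length →
            pvC u (i+1) ((k : Int) + 1) ≤ pvC v (i+1) ((k : Int) + 1) := by
          intro k hk
          by_contra h
          exact hc (hany.mpr ⟨k, hk, by omega⟩)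
        constructor
        · intro h m hm1 hm2 k hk
          rcases Nat.lt_or_ge (i+1) m with h' | h'
          · exact h m h' hm2 k hk
          · have : m = i + 1 := by omega
            subst this; exact hok k hk
        · intro h m hm1 hm2 k hk; exact h m (by omega) hm2 k hk

-- characterization of the A-side port
theorem isA_iff (u v : List Int) :
    (is_bruhat_leq u v = true ↔
      ∀ m, 0 < m → m ≤ u.length → ∀ k, k < u.length →
        pvC u m ((k : Int) + 1) ≤ pvC v m ((k : Int) + 1)) := by
  unfold is_bruhat_leq
  simp only [List.all_eq_true, PySem.List.mem_pyRange_one, Bool.not_eq_eq_eq_not,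
    Bool.not_true, decide_eq_false_iff_not, not_lt, gt_iff_lt]
  constructor
  · intro h m hm1 hm2 k hk
    have hiff := h (m : Int) ⟨by exact_mod_cast hm1, by omega⟩
      ((k : Int) + 1) ⟨by omega, by omega⟩
    rw [PySem.List.slice_to_natCast, PySem.List.slice_to_natCast] at hiff
    simpa [pvC, pvCountGe_eq_countP] using hiff
  · intro h i hi j hj
    have hi' : 0 < i.toNat ∧ i.toNat ≤ u.length := by omega
    have hj' : (j - 1).toNat < u.length ∧ j = ((j - 1).toNat : Int) + 1 := by omega
    have := h i.toNat hi'.1 hi'.2 (j - 1).toNat hj'.1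
    rw [← hj'.2] at this
    rw [PySem.List.slice_to (xs := u) (b := i) (by omega),
        PySem.List.slice_to (xs := v) (b := i) (by omega)]
    simpa [pvC, pvCountGe_eq_countP] using this

theorem isB_iff (u v : List Int) (hv : u.length ≤ v.length) :
    (is_bruhat_leq_alt u v = true ↔
      ∀ m, 0 < m → m ≤ u.length → ∀ k, k < u.length →
        pvC u m ((k : Int) + 1) ≤ pvC v m ((k : Int) + 1)) := by
  unfold is_bruhat_leq_alt
  obtain ⟨b, hb, hiff⟩ := pvLoop_iff u v hv u 0 (List.replicate u.length 0) (by simp)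
      (by intro k hk; simp [pvC]) (by simp)
  rw [hb]
  simpa using hiff

-- ===== VERDICT (by name: the statement is the Claim_ definition above) =====
theorem is_bruhat_leq_spec : Claim_equal_is_bruhat_leq := by
  intro u v _ hpre
  unfold Spec_is_bruhat_leq
  have := (isA_iff u v).trans (isB_iff u v hpre).symm
  cases hA : is_bruhat_leq u v <;> cases hB : is_bruhat_leq_alt u v <;>
    simp_all
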